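-- pv_equiv track=rewrite | github.com/virtual-context/virtual-context | virtual_context/proxy/formats.py | group_into_turns
-- ===== SOURCE A (Python) =====
-- from typing import NamedTuple
--
-- class TurnGroup(NamedTuple):
--     """A logical turn — user message + assistant response + any tool rounds."""
--     indices: list[int]       # raw message/item indices in this turn
--     role: str                # "user" — the initiating role
--     has_tool_activity: bool  # whether this turn includes tool calls/results
--
-- def group_into_turns(body: dict) -> list[TurnGroup]:
--     items = body.get("input", [])
--     if not isinstance(items, list):
--         return []
--     turns: list[TurnGroup] = []
--     current_indices: list[int] = []
--     has_tool = False
--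
--     for i, item in enumerate(items):
--         if not isinstance(item, dict):
--             continue
--         role = item.get("role", "")
--         item_type = item.get("type", "")
--
--         if role == "user":
--             # Start of a new turn — flush the previous one
--             if current_indices:
--                 turns.append(TurnGroup(
--                     indices=current_indices,
--                     role="user",
--                     has_tool_activity=has_tool,
--                 ))
--             current_indices = [i]
--             has_tool = False
--         elif item_type in ("function_call", "function_call_output"):
--             # Bare tool items belong to the current turn
--             if not current_indices:
--                 current_indices = [i]
--             else:
--                 current_indices.append(i)
--             has_tool = True
--         elif item_type == "reasoning":
--             # Reasoning items belong to the current turn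
--             if not current_indices:
--                 current_indices = [i]
--             else:
--                 current_indices.append(i)
--         else:
--             # assistant or other role-based items
--             if not current_indices:
--                 current_indices = [i]
--             else:
--                 current_indices.append(i)
--
--     # Flush the last group
--     if current_indices:
--         turns.append(TurnGroup(
--             indices=current_indices,
--             role="user",
--             has_tool_activity=has_tool,
--         ))
--
--     return turns
-- ===== SOURCE B (Python) =====
-- from typing import NamedTuple
--
-- class TurnGroup(NamedTuple):
--     indices: list[int]
--     role: str
--     has_tool_activity: bool
--
-- def group_into_turns(body: dict) -> list[TurnGroup]:
--     items = body.get("input", [])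
--     if not isinstance(items, list):
--         return []
--     # Pass 1: annotate each dict item with (index, is_user, is_tool).
--     marked = [
--         (i,
--          item.get("role", "") == "user",
--          item.get("role", "") != "user"
--          and item.get("type", "") in ("function_call", "function_call_output"))
--         for i, item in enumerate(items)
--         if isinstance(item, dict)
--     ]
--     # Pass 2: split into segments, a new segment starting at each user item.
--     segments: list[list[tuple[int, bool, bool]]] = []
--     seg: list[tuple[int, bool, bool]] = []
--     for m in marked:
--         if m[1] and seg:
--             segments.append(seg)
--             seg = [m]
--         else:
--             seg.append(m)
--     if seg:
--         segments.append(seg)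
--     # Pass 3: emit one TurnGroup per segment.
--     return [
--         TurnGroup(indices=[m[0] for m in s], role="user",
--                   has_tool_activity=any(m[2] for m in s))
--         for s in segments
--     ]
-- ===== Notes on version B (the rewrite author's own statement) =====
-- stated objective: simpler
-- what changed: Replaces A's single stateful loop carrying (turns, current_indices, has_tool) by a three-pass pipeline: annotate items with (index, is_user, is_tool) flags, split that list into segments at user items, then map each segment to a TurnGroup whose has_tool is any(is_tool).
import Mathlib
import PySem

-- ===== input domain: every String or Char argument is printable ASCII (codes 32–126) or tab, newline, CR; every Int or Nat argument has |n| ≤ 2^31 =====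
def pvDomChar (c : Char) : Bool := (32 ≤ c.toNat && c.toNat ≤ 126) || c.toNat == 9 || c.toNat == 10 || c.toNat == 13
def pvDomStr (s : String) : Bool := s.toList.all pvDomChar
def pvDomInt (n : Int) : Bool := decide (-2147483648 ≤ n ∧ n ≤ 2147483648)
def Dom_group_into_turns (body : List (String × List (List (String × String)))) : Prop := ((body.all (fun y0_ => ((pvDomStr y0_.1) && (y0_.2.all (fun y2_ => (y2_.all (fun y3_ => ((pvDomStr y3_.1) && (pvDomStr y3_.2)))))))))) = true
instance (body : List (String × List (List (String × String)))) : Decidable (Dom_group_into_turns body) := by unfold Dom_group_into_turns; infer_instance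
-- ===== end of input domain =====

-- B replaces A's single stateful loop by a three-pass pipeline (annotate, split at user
-- items, map segments to groups); objective: simpler. Equal return value on all inputs.

-- ===== PORT A =====
-- one loop iteration of A: state = (turns, current_indices, has_tool)
def gitStepA (st : List (List Int × String × Bool) × List Int × Bool)
    (p : Int × List (String × String)) : List (List Int × String × Bool) × List Int × Bool :=
  let turns := st.1
  let cur := st.2.1
  let ht := st.2.2
  let i := p.1
  let role := (PySem.Dict.mk p.2).getD "role" ""
  let ty := (PySem.Dict.mk p.2).getD "type" ""
  if role = "user" then
    ((if cur ≠ [] then turns ++ [(cur, "user", ht)] else turns), [i], false)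
  else if ty = "function_call" ∨ ty = "function_call_output" then
    (turns, (if cur = [] then [i] else cur ++ [i]), true)
  else if ty = "reasoning" then
    (turns, (if cur = [] then [i] else cur ++ [i]), ht)
  else
    (turns, (if cur = [] then [i] else cur ++ [i]), ht)

def group_into_turns (body : List (String × List (List (String × String)))) : List (List Int × String × Bool) :=
  let items := (PySem.Dict.mk body).getD "input" []
  -- every item is a dict of the declared type, so both isinstance checks hold
  let st := (PySem.List.enumerate items).foldl gitStepA ([], [], false)
  if st.2.1 ≠ [] then st.1 ++ [(st.2.1, "user", st.2.2)] else st.1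

-- ===== PORT B =====
-- pass 1: (index, is_user, is_tool) annotation of one item
def gitMark (p : Int × List (String × String)) : Int × Bool × Bool :=
  (p.1,
   (PySem.Dict.mk p.2).getD "role" "" == "user",
   ((PySem.Dict.mk p.2).getD "role" "" != "user") &&
     (((PySem.Dict.mk p.2).getD "type" "" == "function_call") ||
      ((PySem.Dict.mk p.2).getD "type" "" == "function_call_output")))

-- pass 2: one step of the segment split; state = (segments, seg)
def gitStepB (st : List (List (Int × Bool × Bool)) × List (Int × Bool × Bool))
    (m : Int × Bool × Bool) : List (List (Int × Bool × Bool)) × List (Int × Bool × Bool) :=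
  if m.2.1 && !st.2.isEmpty then (st.1 ++ [st.2], [m]) else (st.1, st.2 ++ [m])

-- pass 3: one segment to one TurnGroup
def gitEmit (s : List (Int × Bool × Bool)) : List Int × String × Bool :=
  (s.map (·.1), "user", s.any (·.2.2))

def group_into_turns_alt (body : List (String × List (List (String × String)))) : List (List Int × String × Bool) :=
  let items := (PySem.Dict.mk body).getD "input" []
  let marked := (PySem.List.enumerate items).map gitMark
  let st := marked.foldl gitStepB ([], [])
  let segments := if st.2 ≠ [] then st.1 ++ [st.2] else st.1
  segments.map gitEmit

-- ===== PRECONDITION & SPEC =====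
def Spec_group_into_turns (body : List (String × List (List (String × String)))) (out : List (List Int × String × Bool)) : Prop := out = group_into_turns_alt body
instance (body : List (String × List (List (String × String)))) (out : List (List Int × String × Bool)) : Decidable (Spec_group_into_turns body out) := by unfold Spec_group_into_turns; infer_instance

-- ===== CLAIM (what is proved, stated in full; the proofs are below) =====
def Claim_equal_group_into_turns : Prop := ∀ (body : List (String × List (List (String × String)))), Dom_group_into_turns body → Spec_group_into_turns body (group_into_turns body)

-- ===== LEMMAS AND PROOFS =====

-- loop correspondence: A's fold state is the image of B's fold state under gitEmit / projections
theorem git_fold_corr (l : List (Int × List (String × String)))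
    (segs : List (List (Int × Bool × Bool))) (seg : List (Int × Bool × Bool)) :
    l.foldl gitStepA (segs.map gitEmit, seg.map (·.1), seg.any (·.2.2)) =
      (let b := (l.map gitMark).foldl gitStepB (segs, seg)
       (b.1.map gitEmit, b.2.map (·.1), b.2.any (·.2.2))) := by
  induction l generalizing segs seg with
  | nil => simp
  | cons p rest ih =>
    simp only [List.foldl_cons, List.map_cons]
    have hstep : gitStepA (segs.map gitEmit, seg.map (·.1), seg.any (·.2.2)) p =
        (let b := gitStepB (segs, seg) (gitMark p)
         (b.1.map gitEmit, b.2.map (·.1), b.2.any (·.2.2))) := by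
      simp only [gitStepA, gitStepB, gitMark]
      by_cases hu : (PySem.Dict.mk p.2).getD "role" "" = "user"
      · -- user item: new segment starts
        simp only [hu, if_true]
        have : (("user" : String) == "user") = true := by decide
        simp only [this, Bool.true_and]
        cases seg with
        | nil => simp
        | cons m s =>
          have : (("user" : String) != "user") = false := by decide
          simp [gitEmit]
      · -- non-user item: appended to the current segment
        have hb : ((PySem.Dict.mk p.2).getD "role" "" == "user") = false := by
          simp [hu]
        have hcur : (if seg.map (·.1) = ([] : List Int) then [p.1]
            else seg.map (·.1) ++ [p.1]) = (seg ++ [gitMark p]).map (·.1) := by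
          cases seg <;> simp [gitMark]
        by_cases ht : (PySem.Dict.mk p.2).getD "type" "" = "function_call" ∨
            (PySem.Dict.mk p.2).getD "type" "" = "function_call_output"
        · have hty : (((PySem.Dict.mk p.2).getD "type" "" == "function_call") ||
              ((PySem.Dict.mk p.2).getD "type" "" == "function_call_output")) = true := by
            rcases ht with h | h <;> simp [h]
          simp [hu, hb, ht, hty, List.any_append, bne]
        · have hty : (((PySem.Dict.mk p.2).getD "type" "" == "function_call") ||
              ((PySem.Dict.mk p.2).getD "type" "" == "function_call_output")) = false := by
            rcases not_or.mp ht with ⟨h1, h2⟩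
            simp [h1, h2]
          by_cases hr : (PySem.Dict.mk p.2).getD "type" "" = "reasoning" <;>
            simp [hu, hb, ht, hty, hr, List.any_append, bne]
    rw [hstep]
    exact ih _ _
-- ===== VERDICT (by name: the statement is the Claim_ definition above) =====
theorem group_into_turns_spec : Claim_equal_group_into_turns := by
  intro body _
  unfold Spec_group_into_turns group_into_turns group_into_turns_alt
  have h := git_fold_corr (PySem.List.enumerate ((PySem.Dict.mk body).getD "input" [])) [] []
  simp only [List.map_nil, List.any_nil] at h
  simp only [h]
  set b := ((PySem.List.enumerate ((PySem.Dict.mk body).getD "input" [])).map gitMark).foldl gitStepB ([], [])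
  cases hs : b.2 with
  | nil => simp
  | cons m s => simp [gitEmit]
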